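-- pv_equiv track=rewrite | github.com/RangelGasharov/Python_Basics | algorithms/edabit_palindrom_phrase.py | separate_words
-- ===== SOURCE A (Python) =====
-- def separate_words(sentence):
--     special_characters = [",", ".", "?", "!", "'", " "]
--     words = []
--     current_word = ""
--     for i in range(0, len(sentence)):
--         if sentence[i] in special_characters:
--             if current_word != "" and current_word not in special_characters:
--                 words.append(current_word)
--             current_word = ""
--             continue
--         if i == len(sentence) - 1:
--             if sentence[i] not in special_characters:
--                 current_word += sentence[i]
--                 words.append(current_word)
--         else:
--             current_word += sentence[i]
--     return words
-- ===== SOURCE B (Python) =====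
-- def separate_words(sentence):
--     # Map every delimiter to a space in one pass, then split on spaces and drop empty pieces.
--     normalized = "".join(" " if ch in ",.?!' " else ch for ch in sentence)
--     return [word for word in normalized.split(" ") if word]
-- ===== Notes on version B (the rewrite author's own statement) =====
-- stated objective: simpler
-- what changed: A's index loop with a current-word accumulator and a special last-index flush is replaced by a declarative pipeline: map each of the six delimiter characters to a space, split on spaces, and filter out empty pieces.
import Mathlib
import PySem

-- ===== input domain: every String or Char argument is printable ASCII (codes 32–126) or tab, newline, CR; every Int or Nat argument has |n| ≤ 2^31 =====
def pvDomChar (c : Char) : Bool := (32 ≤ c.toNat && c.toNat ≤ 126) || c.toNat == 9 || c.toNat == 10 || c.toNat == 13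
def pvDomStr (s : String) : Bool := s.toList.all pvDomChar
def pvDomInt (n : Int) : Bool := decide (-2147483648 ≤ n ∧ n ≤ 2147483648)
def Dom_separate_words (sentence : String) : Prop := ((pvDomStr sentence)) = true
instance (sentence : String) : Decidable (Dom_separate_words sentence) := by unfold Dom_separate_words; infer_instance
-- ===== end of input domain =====

-- B replaces A's index loop and word accumulator by: map every delimiter to a space, split on spaces, drop empty pieces (simpler, declarative).


-- ===== PORT A =====
-- the six delimiter characters (Python's special_characters, as chars)
def spChars : List Char := [',', '.', '?', '!', '\'', ' ']

-- the body of A's for-loop; state = (words, current_word), both as char lists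
def sepBody (cs : List Char) (n : Int) (st : List (List Char) × List Char) (i : Int) :
    List (List Char) × List Char :=
  match PySem.List.pyGet? cs i with
  | none => st
  | some c =>
    if c ∈ spChars then
      ((if st.2 ≠ [] ∧ st.2 ∉ spChars.map (fun d => [d]) then st.1 ++ [st.2] else st.1), [])
    else if i = n - 1 then
      (if c ∉ spChars then (st.1 ++ [st.2 ++ [c]], st.2 ++ [c]) else st)
    else
      (st.1, st.2 ++ [c])

def separate_words (sentence : String) : List String :=
  let cs := sentence.toList
  let n : Int := (cs.length : Int)
  (((PySem.List.pyRange 0 n 1).foldl (sepBody cs n) ([], [])).1).map String.ofList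

-- ===== PORT B =====
def separate_words_alt (sentence : String) : List String :=
  let normalized := sentence.toList.map (fun c => if c ∈ spChars then ' ' else c)
  ((PySem.Chars.splitOn normalized [' ']).filter (fun w => decide (w ≠ []))).map String.ofList

-- ===== PRECONDITION & SPEC =====
def Spec_separate_words (sentence : String) (out : List String) : Prop := out = separate_words_alt sentence
instance (sentence : String) (out : List String) : Decidable (Spec_separate_words sentence out) := by unfold Spec_separate_words; infer_instance

-- ===== CLAIM (what is proved, stated in full; the proofs are below) =====
def Claim_equal_separate_words : Prop := ∀ (sentence : String), Dom_separate_words sentence → Spec_separate_words sentence (separate_words sentence)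

-- ===== LEMMAS AND PROOFS =====

-- common specification of both programs: the maximal delimiter-free words of cs, cur = pending word
def W : List Char → List Char → List (List Char)
  | [], cur => if cur = [] then [] else [cur]
  | c :: rest, cur =>
      if c ∈ spChars then (if cur = [] then W rest [] else cur :: W rest [])
      else W rest (cur ++ [c])

-- splitting on a single space with a reversed accumulator (mirrors PySem.Chars.splitOn.go at sep = [' '])
def splitS : List Char → List Char → List (List Char)
  | [], rcur => [rcur.reverse]
  | c :: rest, rcur => if c = ' ' then rcur.reverse :: splitS rest [] else splitS rest (c :: rcur)

theorem go_eq_splitS : ∀ (fuel : Nat) (l rcur : List Char) (hacc : List (List Char)),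
    l.length ≤ fuel →
    PySem.Chars.splitOn.go [' '] fuel l rcur hacc = hacc.reverse ++ splitS l rcur := by
  intro fuel
  induction fuel with
  | zero =>
    intro l rcur hacc h
    have : l = [] := by cases l <;> simp_all
    subst this
    simp [PySem.Chars.splitOn.go, splitS]
  | succ f ih =>
    intro l rcur hacc h
    cases l with
    | nil => simp [PySem.Chars.splitOn.go, splitS]
    | cons c rest =>
      by_cases hc : c = ' '
      · subst hc
        rw [show PySem.Chars.splitOn.go [' '] (f+1) (' ' :: rest) rcur hacc
              = PySem.Chars.splitOn.go [' '] f rest [] (rcur.reverse :: hacc) by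
            simp [PySem.Chars.splitOn.go, List.isPrefixOf]]
        rw [ih rest [] (rcur.reverse :: hacc) (by simpa using Nat.le_of_succ_le_succ h)]
        simp [splitS]
      · rw [show PySem.Chars.splitOn.go [' '] (f+1) (c :: rest) rcur hacc
              = PySem.Chars.splitOn.go [' '] f rest (c :: rcur) hacc by
            simp only [PySem.Chars.splitOn.go, List.isPrefixOf, List.length_cons]
            simp only [Bool.and_true, beq_iff_eq]
            rw [if_neg (by exact fun h' => hc (by simpa using h'.symm))]]
        rw [ih rest (c :: rcur) hacc (by simpa using Nat.le_of_succ_le_succ h)]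
        simp [splitS, hc]

theorem splitOn_space (cs : List Char) : PySem.Chars.splitOn cs [' '] = splitS cs [] := by
  have := go_eq_splitS (cs.length + 1) cs [] [] (by omega)
  simpa [PySem.Chars.splitOn] using this

theorem B_eq_W : ∀ (cs rcur : List Char),
    (splitS (cs.map (fun c => if c ∈ spChars then ' ' else c)) rcur).filter
        (fun w => decide (w ≠ [])) = W cs rcur.reverse := by
  intro cs
  induction cs with
  | nil => intro rcur; by_cases h : rcur.reverse = [] <;> simp [splitS, W, h]
  | cons c rest ih =>
    intro rcur
    by_cases hc : c ∈ spChars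
    · have hsp : ' ' ∈ spChars := by decide
      by_cases h : rcur.reverse = [] <;>
        · simp only [List.map_cons, if_pos hc, splitS, W]
          simpa [h] using ih []
    · have hns : c ≠ ' ' := fun h => hc (h ▸ (by decide : ' ' ∈ spChars))
      have := ih (c :: rcur)
      simp only [List.reverse_cons] at this
      simp only [List.map_cons, if_neg hc, splitS, W]
      simpa [hns, hc] using this

-- a current_word built from non-delimiter characters is never itself one of the delimiter strings
theorem cur_notmem (cur : List Char) (hcur : ∀ c ∈ cur, c ∉ spChars) (h : cur ≠ []) :
    cur ∉ spChars.map (fun d => [d]) := by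
  intro hmem
  simp only [List.mem_map] at hmem
  obtain ⟨d, hd, rfl⟩ := hmem
  exact hcur d (by simp) hd

theorem A_loop (cs : List Char) : ∀ (m k : Nat) (words : List (List Char)) (cur : List Char),
    k + (m + 1) = cs.length → (∀ c ∈ cur, c ∉ spChars) →
    ((PySem.List.pyRange (k : Int) (cs.length : Int) 1).foldl (sepBody cs (cs.length : Int))
        (words, cur)).1 = words ++ W (cs.drop k) cur := by
  intro m
  induction m with
  | zero =>
    intro k words cur hk hcur
    have hklt : k < cs.length := by omega
    have hr : PySem.List.pyRange (k : Int) (cs.length : Int) 1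
        = [(k : Int)] := by
      rw [PySem.List.pyRange_one_cons (by exact_mod_cast hklt)]
      rw [show ((k : Int) + 1) = ((k + 1 : Nat) : Int) by push_cast; ring]
      rw [PySem.List.pyRange_one_eq_nil (by exact_mod_cast (by omega : cs.length ≤ k + 1))]
    have hget : PySem.List.pyGet? cs (k : Int) = some cs[k] := by
      rw [PySem.List.pyGet?_natCast]; simp [hklt]
    have hdrop : cs.drop k = [cs[k]] := by
      rw [List.drop_eq_getElem_cons hklt, List.drop_eq_nil_of_le (by omega)]
    rw [hr, hdrop]
    simp only [List.foldl_cons, List.foldl_nil]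
    by_cases hc : cs[k] ∈ spChars
    · by_cases hcurnil : cur = []
      · simp [sepBody, hget, hc, W, hcurnil]
      · have hnm := cur_notmem cur hcur hcurnil
        simp [sepBody, hget, hc, W, hcurnil, hnm]
    · have hlast : (k : Int) = (cs.length : Int) - 1 := by omega
      simp only [sepBody, hget, if_neg hc, if_pos hlast, if_pos hc]
      simp [W]
      exact fun h => absurd h hc
  | succ m ih =>
    intro k words cur hk hcur
    have hklt : k < cs.length := by omega
    rw [PySem.List.pyRange_one_cons (by exact_mod_cast hklt)]
    rw [show ((k : Int) + 1) = ((k + 1 : Nat) : Int) by push_cast; ring]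
    have hget : PySem.List.pyGet? cs (k : Int) = some cs[k] := by
      rw [PySem.List.pyGet?_natCast]; simp [hklt]
    have hdrop : cs.drop k = cs[k] :: cs.drop (k + 1) := List.drop_eq_getElem_cons hklt
    rw [List.foldl_cons, hdrop]
    by_cases hc : cs[k] ∈ spChars
    · have hbody : sepBody cs (cs.length : Int) (words, cur) (k : Int)
          = ((if cur ≠ [] ∧ cur ∉ spChars.map (fun d => [d]) then words ++ [cur] else words), []) := by
        simp [sepBody, hget, hc]
      rw [hbody]
      rw [ih (k + 1) _ [] (by omega) (by simp)]
      by_cases hcurnil : cur = []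
      · simp [W, hc, hcurnil]
      · have hnm := cur_notmem cur hcur hcurnil
        simp [W, hc, hcurnil, hnm]
    · have hnotlast : ¬ ((k : Int) = (cs.length : Int) - 1) := by omega
      have hbody : sepBody cs (cs.length : Int) (words, cur) (k : Int) = (words, cur ++ [cs[k]]) := by
        simp [sepBody, hget, hc, hnotlast]
      rw [hbody]
      rw [ih (k + 1) words (cur ++ [cs[k]]) (by omega)
        (by intro c hcmem; rcases List.mem_append.mp hcmem with h | h
            · exact hcur c h
            · simpa [List.mem_singleton.mp h] using hc)]
      simp [W, hc]

-- ===== VERDICT (by name: the statement is the Claim_ definition above) =====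
theorem separate_words_spec : Claim_equal_separate_words := by
  intro sentence _
  unfold Spec_separate_words
  simp only [separate_words, separate_words_alt]
  rw [splitOn_space, B_eq_W sentence.toList []]
  simp only [List.reverse_nil]
  congr 1
  cases hcs : sentence.toList with
  | nil =>
    simp only [List.length_nil, Nat.cast_zero]
    rw [PySem.List.pyRange_one_eq_nil (le_refl 0)]
    simp [W]
  | cons c rest =>
    have h := A_loop (c :: rest) rest.length 0 [] [] (by simp) (by simp)
    simpa using h
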